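-- pv_equiv track=rewrite | github.com/chengnani1/llmmui | src/analy_pipline/judge/knowledge_retriever.py | _match_terms
-- ===== SOURCE A (Python) =====
-- from typing import Any, Dict, List, Optional, Set, Tuple
--
-- def _as_text(v: Any, max_len: int = 320) -> str:
--     s = str(v or "").strip()
--     return s[:max_len] if len(s) > max_len else s
--
-- def _norm(v: Any, max_len: int = 120) -> str:
--     return _as_text(v, max_len).lower()
--
-- def _match_terms(candidates: List[str], context_blob: str, context_terms: Set[str]) -> List[str]:
--     matched: List[str] = []
--     seen_keys: Set[str] = set()
--     for cue in candidates:
--         key = _norm(cue, 80)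
--         if not key:
--             continue
--         if key in seen_keys:
--             continue
--         if key in context_blob or key in context_terms:
--             matched.append(cue)
--             seen_keys.add(key)
--     return matched
-- ===== SOURCE B (Python) =====
-- from typing import List, Set
--
--
-- def _match_terms(candidates: List[str], context_blob: str, context_terms: Set[str]) -> List[str]:
--     # Pass 1: ordered dedup — first cue per non-empty normalized key.
--     keyed = {}
--     for cue in candidates:
--         key = cue.strip()[:80].lower()
--         if key and key not in keyed:
--             keyed[key] = cue
--     # Pass 2: keep the cues whose key occurs in the blob or the term set.
--     return [cue for key, cue in keyed.items()
--             if key in context_blob or key in context_terms]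
-- ===== Notes on version B (the rewrite author's own statement) =====
-- stated objective: alternative
-- what changed: B replaces A's single loop threading a matched-list and a seen-set of matched keys by a two-pass decomposition: an ordered dict dedup of (key, first cue) pairs, then a stateless filter by substring/term-set membership.
import Mathlib
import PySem

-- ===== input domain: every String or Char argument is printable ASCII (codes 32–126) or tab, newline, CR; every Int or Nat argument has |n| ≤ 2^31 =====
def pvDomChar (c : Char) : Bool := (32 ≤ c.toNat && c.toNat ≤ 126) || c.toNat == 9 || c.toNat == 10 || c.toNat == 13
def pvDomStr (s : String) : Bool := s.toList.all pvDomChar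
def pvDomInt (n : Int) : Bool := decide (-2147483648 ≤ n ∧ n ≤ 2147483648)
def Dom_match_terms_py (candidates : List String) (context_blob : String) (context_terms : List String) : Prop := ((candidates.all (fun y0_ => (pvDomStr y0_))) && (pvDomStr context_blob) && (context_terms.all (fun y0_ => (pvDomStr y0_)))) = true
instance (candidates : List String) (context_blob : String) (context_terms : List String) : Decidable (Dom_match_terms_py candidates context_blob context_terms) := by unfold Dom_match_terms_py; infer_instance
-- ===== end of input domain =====

-- B is a two-pass decomposition (ordered dict dedup of keys, then a stateless filter)
-- of A's single stateful loop; equal return value on every input, same cost class.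

-- ===== PORT A =====
-- _as_text(v, max_len): on a str argument, str(v or "").strip() = v.strip()
def pvAsText (v : String) (maxLen : Int) : String :=
  let s := PySem.Str.strip v
  if (PySem.Str.len s : Int) > maxLen then PySem.Str.slice s none (some maxLen) else s

-- _norm(v, max_len)
def pvNorm (v : String) (maxLen : Int) : String := PySem.Str.lower (pvAsText v maxLen)

def match_terms_py (candidates : List String) (context_blob : String) (context_terms : List String) : List String :=
  (candidates.foldl (fun (st : List String × PySem.Set String) cue =>
    let key := pvNorm cue 80
    if key = "" then st
    else if PySem.Set.contains st.2 key then st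
    else if PySem.Str.isIn key context_blob || PySem.Set.contains context_terms key then
      (st.1 ++ [cue], PySem.Set.add st.2 key)
    else st) ([], PySem.Set.empty)).1

-- ===== PORT B =====
-- cue.strip()[:80].lower()
def pvKeyB (cue : String) : String :=
  PySem.Str.lower (PySem.Str.slice (PySem.Str.strip cue) none (some 80))

def match_terms_py_alt (candidates : List String) (context_blob : String) (context_terms : List String) : List String :=
  let keyed := candidates.foldl (fun (d : PySem.Dict String String) cue =>
    let key := pvKeyB cue
    if key ≠ "" && !(d.contains key) then d.insert key cue else d) PySem.Dict.empty
  keyed.items.filterMap (fun p =>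
    if PySem.Str.isIn p.1 context_blob || PySem.Set.contains context_terms p.1 then some p.2 else none)

-- ===== PRECONDITION & SPEC =====
def Spec_match_terms_py (candidates : List String) (context_blob : String) (context_terms : List String) (out : List String) : Prop := out = match_terms_py_alt candidates context_blob context_terms
instance (candidates : List String) (context_blob : String) (context_terms : List String) (out : List String) : Decidable (Spec_match_terms_py candidates context_blob context_terms out) := by unfold Spec_match_terms_py; infer_instance

-- ===== CLAIM (what is proved, stated in full; the proofs are below) =====
def Claim_equal_match_terms_py : Prop := ∀ (candidates : List String) (context_blob : String) (context_terms : List String), Dom_match_terms_py candidates context_blob context_terms → Spec_match_terms_py candidates context_blob context_terms (match_terms_py candidates context_blob context_terms)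

-- ===== LEMMAS AND PROOFS =====

-- s[:80] is s itself when len(s) ≤ 80
lemma slice80_of_le (s : String) (h : PySem.Str.len s ≤ 80) :
    PySem.Str.slice s none (some 80) = s := by
  apply String.toList_inj.mp
  rw [PySem.Str.toList_slice, PySem.Chars.slice_eq_listSlice,
    PySem.List.slice_to (xs := s.toList) (b := 80) (by norm_num)]
  apply List.take_of_length_le
  simpa [PySem.Str.len_eq] using h

-- the two normalizations agree
lemma key_eq (cue : String) : pvNorm cue 80 = pvKeyB cue := by
  unfold pvNorm pvKeyB pvAsText
  by_cases h : (PySem.Str.len (PySem.Str.strip cue) : Int) > 80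
  · rw [if_pos h]
  · rw [if_neg h, slice80_of_le _ (le_of_not_gt h)]

lemma main_inv (blob : String) (terms : List String) :
    ∀ (cs : List String) (m : List String) (s : PySem.Set String) (d : PySem.Dict String String),
      m = d.items.filterMap (fun p =>
        if PySem.Str.isIn p.1 blob || PySem.Set.contains terms p.1 then some p.2 else none) →
      (∀ k, PySem.Set.contains s k =
        (d.contains k && (PySem.Str.isIn k blob || PySem.Set.contains terms k))) →
      (cs.foldl (fun (st : List String × PySem.Set String) cue =>
        let key := pvNorm cue 80
        if key = "" then st
        else if PySem.Set.contains st.2 key then st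
        else if PySem.Str.isIn key blob || PySem.Set.contains terms key then
          (st.1 ++ [cue], PySem.Set.add st.2 key)
        else st) (m, s)).1 =
      (cs.foldl (fun (d : PySem.Dict String String) cue =>
        let key := pvKeyB cue
        if key ≠ "" && !(d.contains key) then d.insert key cue else d) d).items.filterMap
        (fun p => if PySem.Str.isIn p.1 blob || PySem.Set.contains terms p.1 then some p.2 else none) := by
  intro cs
  induction cs with
  | nil => intro m s d hm _; simpa using hm
  | cons c cs ih =>
    intro m s d hm hs
    simp only [List.foldl_cons, ← key_eq c]
    by_cases h0 : pvNorm c 80 = ""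
    · simp only [h0, if_true, ne_eq, not_true_eq_false, decide_false, Bool.false_and,
        Bool.false_eq_true, if_false]
      exact ih m s d hm hs
    · rw [if_neg h0]
      by_cases hc : d.contains (pvNorm c 80) = true
      · -- key already in the dict: both sides leave their state unchanged
        have hsk := hs (pvNorm c 80)
        rw [hc, Bool.true_and] at hsk
        have hbf : (decide (pvNorm c 80 ≠ "") && !d.contains (pvNorm c 80)) = false := by
          simp [hc]
        simp only [hbf, Bool.false_eq_true, if_false]
        by_cases hmatch : (PySem.Str.isIn (pvNorm c 80) blob
            || PySem.Set.contains terms (pvNorm c 80)) = true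
        · rw [if_pos (by rw [hsk, hmatch])]
          exact ih m s d hm hs
        · have hsf : s.contains (pvNorm c 80) = false := by
            rw [hsk]; exact Bool.eq_false_iff.mpr hmatch
          rw [if_neg (by rw [hsf]; simp), if_neg hmatch]
          exact ih m s d hm hs
      · -- fresh key: B inserts it; A appends iff it matches
        have hcf : d.contains (pvNorm c 80) = false := Bool.eq_false_iff.mpr hc
        have hsf : s.contains (pvNorm c 80) = false := by rw [hs, hcf]; simp
        have hadd : ∀ k' : String, (s.add (pvNorm c 80)).contains k'
            = (s.contains k' || k' == pvNorm c 80) := fun k' =>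
          Bool.eq_iff_iff.mpr (by
            simp only [PySem.Set.contains_iff, PySem.Set.mem_add, Bool.or_eq_true, beq_iff_eq])
        rw [if_neg (by rw [hsf]; simp)]
        have hbt : (decide (pvNorm c 80 ≠ "") && !d.contains (pvNorm c 80)) = true := by
          simp [h0, hcf]
        simp only [hbt, if_true]
        by_cases hmatch : (PySem.Str.isIn (pvNorm c 80) blob
            || PySem.Set.contains terms (pvNorm c 80)) = true
        · rw [if_pos hmatch]
          refine ih _ _ _ ?_ ?_
          · rw [PySem.Dict.items_insert_of_not_contains _ _ hcf, List.filterMap_append, hm]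
            simp only [List.filterMap_cons, List.filterMap_nil, hmatch, if_true]
          · intro k'
            rw [hadd k', PySem.Dict.contains_insert, hs k']
            by_cases hk' : k' = pvNorm c 80
            · rw [hk']
              simp only [hcf, beq_self_eq_true, Bool.false_and, Bool.false_or, Bool.true_or,
                Bool.true_and, hmatch]
            · have hb : (k' == pvNorm c 80) = false := by simp [hk']
              simp only [hb, Bool.or_false, Bool.false_or]
        · have hmf : (PySem.Str.isIn (pvNorm c 80) blob
              || PySem.Set.contains terms (pvNorm c 80)) = false := Bool.eq_false_iff.mpr hmatch
          rw [if_neg hmatch]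
          refine ih _ _ _ ?_ ?_
          · rw [PySem.Dict.items_insert_of_not_contains _ _ hcf, List.filterMap_append, hm]
            simp only [List.filterMap_cons, List.filterMap_nil, hmf, Bool.false_eq_true,
              if_false, List.append_nil]
          · intro k'
            rw [PySem.Dict.contains_insert, hs k']
            by_cases hk' : k' = pvNorm c 80
            · rw [hk']
              simp only [hcf, beq_self_eq_true, Bool.false_and, Bool.true_or, Bool.true_and, hmf]
            · have hb : (k' == pvNorm c 80) = false := by simp [hk']
              simp only [hb, Bool.false_or]

-- ===== VERDICT (by name: the statement is the Claim_ definition above) =====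
theorem match_terms_py_spec : Claim_equal_match_terms_py := by
  intro candidates context_blob context_terms _
  unfold Spec_match_terms_py match_terms_py match_terms_py_alt
  exact main_inv context_blob context_terms candidates [] PySem.Set.empty PySem.Dict.empty rfl
    (by intro k; simp [PySem.Set.contains, PySem.Set.empty])
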